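-- pv_equiv track=rewrite | github.com/kiran270/Dream11 | checkapp.py | validate_team_roles
-- ===== SOURCE A (Python) =====
-- def validate_team_roles(team):
-- 	"""Validate that team has at least 1 WK, 1 BAT, 1 ALL/AL, and 1 BOWL"""
-- 	roles = {'WK': 0, 'BAT': 0, 'ALL': 0, 'AL': 0, 'BOWL': 0}
--
-- 	for player in team:
-- 		if len(player) > 2:  # Ensure player has role data
-- 			role = player[2]
-- 			if role in roles:
-- 				roles[role] += 1
--
-- 	# Check if we have at least 1 of each required role
-- 	has_wk = roles['WK'] >= 1
-- 	has_bat = roles['BAT'] >= 1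
-- 	has_all = (roles['ALL'] + roles['AL']) >= 1  # ALL or AL counts as all-rounder
-- 	has_bowl = roles['BOWL'] >= 1
--
-- 	return has_wk and has_bat and has_all and has_bowl
-- ===== SOURCE B (Python) =====
-- def validate_team_roles(team):
-- 	"""Validate that team has at least 1 WK, 1 BAT, 1 ALL/AL, and 1 BOWL"""
-- 	return (any(len(p) > 2 and p[2] == 'WK' for p in team)
-- 		and any(len(p) > 2 and p[2] == 'BAT' for p in team)
-- 		and any(len(p) > 2 and p[2] in ('ALL', 'AL') for p in team)
-- 		and any(len(p) > 2 and p[2] == 'BOWL' for p in team))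
-- ===== Notes on version B (the rewrite author's own statement) =====
-- stated objective: idiomatic
-- what changed: Replaced the role-counting dict accumulated in one pass with four independent short-circuiting any() existence scans, one per required role.
import Mathlib
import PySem

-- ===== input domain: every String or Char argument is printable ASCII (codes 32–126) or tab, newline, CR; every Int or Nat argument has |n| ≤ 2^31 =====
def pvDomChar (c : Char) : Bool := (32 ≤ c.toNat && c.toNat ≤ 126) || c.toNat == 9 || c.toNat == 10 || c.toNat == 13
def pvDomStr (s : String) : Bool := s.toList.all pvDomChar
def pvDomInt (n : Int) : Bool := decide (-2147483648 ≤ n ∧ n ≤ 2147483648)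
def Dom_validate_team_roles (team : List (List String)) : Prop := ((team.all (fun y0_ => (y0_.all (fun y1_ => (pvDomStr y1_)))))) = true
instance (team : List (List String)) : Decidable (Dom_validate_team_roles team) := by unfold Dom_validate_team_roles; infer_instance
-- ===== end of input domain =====

-- B replaces A's single counting-dict pass with four independent existence scans (one per required role); objective: idiomatic.


-- ===== PORT A =====
-- the counting loop body: if len(player) > 2, look up the role and bump its counter when it is a known key
def vtrStep (d : PySem.Dict String Int) (player : List String) : PySem.Dict String Int :=
  if player.length > 2 then
    let role := PySem.List.pyGetD player 2 ""
    if d.contains role then d.modify role 0 (· + 1) else d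
  else d

def validate_team_roles (team : List (List String)) : Bool :=
  let roles : PySem.Dict String Int :=
    PySem.Dict.ofList [("WK", 0), ("BAT", 0), ("ALL", 0), ("AL", 0), ("BOWL", 0)]
  let roles := team.foldl vtrStep roles
  let has_wk := roles.getD "WK" 0 ≥ 1
  let has_bat := roles.getD "BAT" 0 ≥ 1
  let has_all := (roles.getD "ALL" 0 + roles.getD "AL" 0) ≥ 1
  let has_bowl := roles.getD "BOWL" 0 ≥ 1
  has_wk && has_bat && has_all && has_bowl

-- ===== PORT B =====
def validate_team_roles_alt (team : List (List String)) : Bool :=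
  (team.any (fun p => decide (p.length > 2) && (PySem.List.pyGetD p 2 "" == "WK")))
  && (team.any (fun p => decide (p.length > 2) && (PySem.List.pyGetD p 2 "" == "BAT")))
  && (team.any (fun p => decide (p.length > 2) &&
        (PySem.List.pyGetD p 2 "" == "ALL" || PySem.List.pyGetD p 2 "" == "AL")))
  && (team.any (fun p => decide (p.length > 2) && (PySem.List.pyGetD p 2 "" == "BOWL")))

-- ===== PRECONDITION & SPEC =====
def Spec_validate_team_roles (team : List (List String)) (out : Bool) : Prop := out = validate_team_roles_alt team
instance (team : List (List String)) (out : Bool) : Decidable (Spec_validate_team_roles team out) := by unfold Spec_validate_team_roles; infer_instance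

-- ===== CLAIM (what is proved, stated in full; the proofs are below) =====
def Claim_equal_validate_team_roles : Prop := ∀ (team : List (List String)), Dom_validate_team_roles team → Spec_validate_team_roles team (validate_team_roles team)

-- ===== LEMMAS AND PROOFS =====

theorem vtr_getD_fold (l : List (List String)) (d : PySem.Dict String Int) (r : String)
    (hr : d.contains r = true) :
    (l.foldl vtrStep d).getD r 0 =
      d.getD r 0 + (l.countP (fun p => decide (p.length > 2) && (PySem.List.pyGetD p 2 "" == r)) : Int) := by
  induction l generalizing d with
  | nil => simp
  | cons p t ih =>
    simp only [List.foldl_cons, List.countP_cons]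
    have hc : (vtrStep d p).contains r = true := by
      unfold vtrStep
      by_cases h1 : p.length > 2
      · simp only [if_pos h1]
        by_cases h2 : d.contains (PySem.List.pyGetD p 2 "") = true
        · rw [if_pos h2, PySem.Dict.contains_modify]
          simp [hr]
        · rw [if_neg h2]; exact hr
      · simp only [if_neg h1]; exact hr
    rw [ih _ hc]
    unfold vtrStep
    by_cases h1 : p.length > 2
    · simp only [if_pos h1]
      by_cases heq : PySem.List.pyGetD p 2 "" = r
      · rw [heq, if_pos hr, PySem.Dict.getD_modify_self]
        simp [h1]
        ring
      · by_cases h2 : d.contains (PySem.List.pyGetD p 2 "") = true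
        · rw [if_pos h2, PySem.Dict.getD_modify_of_ne d 0 _ (fun h => heq h.symm)]
          simp [heq]
        · rw [if_neg h2]; simp [heq]
    · simp only [if_neg h1]
      simp [h1]

theorem vtr_count_pos_iff (l : List (List String)) (q : List String → Bool) :
    (1 ≤ (l.countP q : Int)) ↔ l.any q = true := by
  rw [List.any_eq_true]
  constructor
  · intro h
    have : 0 < l.countP q := by exact_mod_cast h
    exact List.countP_pos_iff.mp this
  · intro h
    have : 0 < l.countP q := List.countP_pos_iff.mpr h
    exact_mod_cast this

-- ===== VERDICT (by name: the statement is the Claim_ definition above) =====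
theorem validate_team_roles_spec : Claim_equal_validate_team_roles := by
  intro team _
  unfold Spec_validate_team_roles
  set d0 : PySem.Dict String Int :=
    PySem.Dict.ofList [("WK", 0), ("BAT", 0), ("ALL", 0), ("AL", 0), ("BOWL", 0)] with hd0
  have hA : validate_team_roles team =
      (((decide ((team.foldl vtrStep d0).getD "WK" 0 ≥ 1)
        && decide ((team.foldl vtrStep d0).getD "BAT" 0 ≥ 1))
        && decide (((team.foldl vtrStep d0).getD "ALL" 0 + (team.foldl vtrStep d0).getD "AL" 0) ≥ 1))
        && decide ((team.foldl vtrStep d0).getD "BOWL" 0 ≥ 1)) := rfl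
  rw [hA]
  have h := fun r hr => vtr_getD_fold team d0 r hr
  rw [h "WK" (by decide), h "BAT" (by decide), h "ALL" (by decide), h "AL" (by decide),
      h "BOWL" (by decide)]
  have eWK : d0.getD "WK" 0 = 0 := by decide
  have eBAT : d0.getD "BAT" 0 = 0 := by decide
  have eALL : d0.getD "ALL" 0 = 0 := by decide
  have eAL : d0.getD "AL" 0 = 0 := by decide
  have eBOWL : d0.getD "BOWL" 0 = 0 := by decide
  rw [eWK, eBAT, eALL, eAL, eBOWL]
  simp only [zero_add]
  unfold validate_team_roles_alt
  have cwk := vtr_count_pos_iff team (fun p => decide (p.length > 2) && (PySem.List.pyGetD p 2 "" == "WK"))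
  have cbat := vtr_count_pos_iff team (fun p => decide (p.length > 2) && (PySem.List.pyGetD p 2 "" == "BAT"))
  have cbowl := vtr_count_pos_iff team (fun p => decide (p.length > 2) && (PySem.List.pyGetD p 2 "" == "BOWL"))
  have call : (1 ≤ ((team.countP (fun p => decide (p.length > 2) && (PySem.List.pyGetD p 2 "" == "ALL")) : Int)
        + (team.countP (fun p => decide (p.length > 2) && (PySem.List.pyGetD p 2 "" == "AL")) : Int))) ↔
      team.any (fun p => decide (p.length > 2) &&
        (PySem.List.pyGetD p 2 "" == "ALL" || PySem.List.pyGetD p 2 "" == "AL")) = true := by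
    rw [List.any_eq_true]
    constructor
    · intro hsum
      have hor : 0 < team.countP (fun p => decide (p.length > 2) && (PySem.List.pyGetD p 2 "" == "ALL"))
           ∨ 0 < team.countP (fun p => decide (p.length > 2) && (PySem.List.pyGetD p 2 "" == "AL")) := by
        omega
      rcases hor with hpos | hpos <;>
        · obtain ⟨p, hp, hq⟩ := List.countP_pos_iff.mp hpos
          refine ⟨p, hp, ?_⟩
          simp only [Bool.and_eq_true] at hq ⊢
          exact ⟨hq.1, by simp [hq.2]⟩
    · rintro ⟨p, hp, hq⟩
      simp only [Bool.and_eq_true, Bool.or_eq_true] at hq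
      have hnnA : (0:Int) ≤ team.countP (fun p => decide (p.length > 2) && (PySem.List.pyGetD p 2 "" == "ALL")) := by positivity
      have hnnB : (0:Int) ≤ team.countP (fun p => decide (p.length > 2) && (PySem.List.pyGetD p 2 "" == "AL")) := by positivity
      rcases hq.2 with h2 | h2
      · have h1 : 0 < team.countP (fun p => decide (p.length > 2) && (PySem.List.pyGetD p 2 "" == "ALL")) :=
          List.countP_pos_iff.mpr ⟨p, hp, by simp [hq.1, h2]⟩
        have h1' : (1:Int) ≤ team.countP (fun p => decide (p.length > 2) && (PySem.List.pyGetD p 2 "" == "ALL")) := by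
          exact_mod_cast h1
        omega
      · have h1 : 0 < team.countP (fun p => decide (p.length > 2) && (PySem.List.pyGetD p 2 "" == "AL")) :=
          List.countP_pos_iff.mpr ⟨p, hp, by simp [hq.1, h2]⟩
        have h1' : (1:Int) ≤ team.countP (fun p => decide (p.length > 2) && (PySem.List.pyGetD p 2 "" == "AL")) := by
          exact_mod_cast h1
        omega
  simp only [ge_iff_le]
  rw [Bool.eq_iff_iff]
  simp only [Bool.and_eq_true, decide_eq_true_eq]
  constructor
  · rintro ⟨⟨⟨hw, hb⟩, ha⟩, ho⟩
    exact ⟨⟨⟨cwk.mp hw, cbat.mp hb⟩, call.mp ha⟩, cbowl.mp ho⟩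
  · rintro ⟨⟨⟨hw, hb⟩, ha⟩, ho⟩
    exact ⟨⟨⟨cwk.mpr hw, cbat.mpr hb⟩, call.mpr ha⟩, cbowl.mpr ho⟩
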